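-- pv_equiv track=rewrite | github.com/dreambitsfoundation/framework_island_task1 | api/views/filters.py | generate_required_fields_map
-- ===== SOURCE A (Python) =====
-- def generate_required_fields_map(required_fields: list):
--     """
--     This method generates a map of all the required fields.
--     """
--     output_required_fields = []
--     supplier_fields = []
--     supplier_requirement_set = False
--     for field_name in required_fields:
--         if field_name.startswith("supplier__"):
--             if not supplier_requirement_set:
--                 output_required_fields.append("supplier")
--                 supplier_requirement_set = True
--             supplier_fields.append(field_name.replace("supplier__", ""))
--         else:
--             output_required_fields.append(field_name)
--
--     data = {"inventory": output_required_fields, "supplier": supplier_fields}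
--
--     return data
-- ===== SOURCE B (Python) =====
-- def generate_required_fields_map(required_fields: list):
--     """
--     This method generates a map of all the required fields.
--     """
--     is_sup = lambda f: f.startswith("supplier__")
--     supplier = [f.replace("supplier__", "") for f in required_fields if is_sup(f)]
--     inventory = [f for f in required_fields if not is_sup(f)]
--     if supplier:
--         idx = next(i for i, f in enumerate(required_fields) if is_sup(f))
--         inventory.insert(idx, "supplier")
--     return {"inventory": inventory, "supplier": supplier}
-- ===== Notes on version B (the rewrite author's own statement) =====
-- stated objective: simpler
-- what changed: Replaces A's single stateful loop (three mutable accumulators plus a one-shot flag) with two independent comprehensions over the input and one computed insert of 'supplier' at the index of the first supplier__ field.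
import Mathlib
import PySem

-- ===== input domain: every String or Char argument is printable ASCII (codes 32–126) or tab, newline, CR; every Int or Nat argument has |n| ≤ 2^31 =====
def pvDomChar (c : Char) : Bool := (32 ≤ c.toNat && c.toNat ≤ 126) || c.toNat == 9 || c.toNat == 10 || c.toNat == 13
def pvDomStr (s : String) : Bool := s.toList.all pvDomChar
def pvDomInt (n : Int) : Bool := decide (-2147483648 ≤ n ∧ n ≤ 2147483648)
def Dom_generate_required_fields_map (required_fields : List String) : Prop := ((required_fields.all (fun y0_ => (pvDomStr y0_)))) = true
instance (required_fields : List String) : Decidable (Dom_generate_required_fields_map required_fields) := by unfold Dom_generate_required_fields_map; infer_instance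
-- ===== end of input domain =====

-- B replaces A's stateful single loop (append + one-shot flag) by two comprehension-style
-- passes plus one computed insert; objective: simpler decomposition, same cost.

-- f.startswith("supplier__")
def pvIsSup (f : String) : Bool := PySem.Str.startswith f "supplier__"
-- f.replace("supplier__", "")
def pvStripSup (f : String) : String := PySem.Str.replace f "supplier__" ""

-- ===== PORT A =====
-- one step of A's for-loop; state = (output_required_fields, supplier_fields, supplier_requirement_set)
def pvStepA (s : List String × List String × Bool) (field_name : String) :
    List String × List String × Bool :=
  if pvIsSup field_name then
    let s := if !s.2.2 then (s.1 ++ ["supplier"], s.2.1, true) else s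
    (s.1, s.2.1 ++ [pvStripSup field_name], s.2.2)
  else
    (s.1 ++ [field_name], s.2.1, s.2.2)

def generate_required_fields_map (required_fields : List String) : List (String × List String) :=
  let st := required_fields.foldl pvStepA ([], [], false)
  [("inventory", st.1), ("supplier", st.2.1)]

-- ===== PORT B =====
def generate_required_fields_map_alt (required_fields : List String) : List (String × List String) :=
  let supplier := (required_fields.filter pvIsSup).map pvStripSup
  let inventory := required_fields.filter (fun f => !pvIsSup f)
  let inventory :=
    if supplier = [] then inventory
    else
      -- idx = next(i for i, f in enumerate(required_fields) if is_sup(f))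
      let idx := required_fields.findIdx pvIsSup
      PySem.List.insert inventory (idx : Int) "supplier"
  [("inventory", inventory), ("supplier", supplier)]

-- ===== PRECONDITION & SPEC =====
def Spec_generate_required_fields_map (required_fields : List String) (out : List (String × List String)) : Prop := out = generate_required_fields_map_alt required_fields
instance (required_fields : List String) (out : List (String × List String)) : Decidable (Spec_generate_required_fields_map required_fields out) := by unfold Spec_generate_required_fields_map; infer_instance

-- ===== CLAIM (what is proved, stated in full; the proofs are below) =====
def Claim_equal_generate_required_fields_map : Prop := ∀ (required_fields : List String), Dom_generate_required_fields_map required_fields → Spec_generate_required_fields_map required_fields (generate_required_fields_map required_fields)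

-- ===== LEMMAS AND PROOFS =====

-- once the flag is set, A just filters/maps the rest
theorem pvFoldTrue (rf : List String) : ∀ (inv sup : List String),
    rf.foldl pvStepA (inv, sup, true) =
      (inv ++ rf.filter (fun f => !pvIsSup f), sup ++ (rf.filter pvIsSup).map pvStripSup, true) := by
  induction rf with
  | nil => intro inv sup; simp
  | cons f fs ih =>
    intro inv sup
    simp only [List.foldl_cons, pvStepA]
    by_cases h : pvIsSup f = true
    · rw [if_pos h]
      show List.foldl pvStepA (inv, sup ++ [pvStripSup f], true) fs = _
      rw [ih]
      simp [List.filter_cons, h]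
    · rw [if_neg (by simp [h])]
      rw [ih]
      simp [List.filter_cons, h]

-- flag still false: characterisation via the first supplier__ index
theorem pvFoldFalse (rf : List String) : ∀ (inv sup : List String),
    rf.foldl pvStepA (inv, sup, false) =
      if rf.any pvIsSup then
        (inv ++ rf.take (rf.findIdx pvIsSup) ++
           "supplier" :: (rf.drop (rf.findIdx pvIsSup)).filter (fun f => !pvIsSup f),
         sup ++ (rf.filter pvIsSup).map pvStripSup, true)
      else (inv ++ rf, sup, false) := by
  induction rf with
  | nil => intro inv sup; simp
  | cons f fs ih =>
    intro inv sup
    simp only [List.foldl_cons, pvStepA]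
    by_cases h : pvIsSup f = true
    · rw [if_pos h]
      simp only [Bool.not_false, ite_true]
      rw [pvFoldTrue]
      simp [List.any_cons, h, List.findIdx_cons, List.filter_cons]
    · rw [if_neg (by simp [h])]
      rw [ih]
      by_cases ha : fs.any pvIsSup = true <;>
        simp [List.any_cons, h, ha, List.findIdx_cons, List.filter_cons]

-- the filtered list splits at the first supplier__ index, which is within bounds
theorem pvFilterSplit (rf : List String) (h : rf.any pvIsSup = true) :
    rf.filter (fun f => !pvIsSup f) =
      rf.take (rf.findIdx pvIsSup) ++ (rf.drop (rf.findIdx pvIsSup)).filter (fun f => !pvIsSup f) ∧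
    rf.findIdx pvIsSup ≤ (rf.filter (fun f => !pvIsSup f)).length := by
  induction rf with
  | nil => simp at h
  | cons f fs ih =>
    by_cases hf : pvIsSup f = true
    · simp [List.findIdx_cons, hf, List.filter_cons]
    · have ha : fs.any pvIsSup = true := by simpa [List.any_cons, hf] using h
      obtain ⟨h1, h2⟩ := ih ha
      refine ⟨?_, ?_⟩
      · simp [List.findIdx_cons, hf, List.filter_cons, h1]
      · simp only [List.findIdx_cons, hf, cond_false, List.filter_cons, Bool.not_eq_true']
        simp [hf]
        omega

-- the computed insert equals A's interleaving, given some supplier field exists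
theorem pvInsertEq (rf : List String) (h : rf.any pvIsSup = true) :
    PySem.List.insert (rf.filter (fun f => !pvIsSup f)) ((rf.findIdx pvIsSup : Nat) : Int) "supplier" =
      rf.take (rf.findIdx pvIsSup) ++
        "supplier" :: (rf.drop (rf.findIdx pvIsSup)).filter (fun f => !pvIsSup f) := by
  obtain ⟨h1, h2⟩ := pvFilterSplit rf h
  rw [PySem.List.insert_natCast _ _ _ h2, h1]
  have hlen : (rf.take (rf.findIdx pvIsSup)).length = rf.findIdx pvIsSup := by
    simp [List.length_take]
    exact le_of_lt (List.findIdx_lt_length.mpr (by simpa using h))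
  rw [List.take_append_of_le_length (le_of_eq hlen.symm),
      List.drop_append_of_le_length (le_of_eq hlen.symm)]
  simp [hlen]

-- ===== VERDICT (by name: the statement is the Claim_ definition above) =====
theorem generate_required_fields_map_spec : Claim_equal_generate_required_fields_map := by
  intro rf _
  unfold Spec_generate_required_fields_map generate_required_fields_map generate_required_fields_map_alt
  rw [pvFoldFalse rf [] []]
  by_cases h : rf.any pvIsSup = true
  · have hne : (rf.filter pvIsSup).map pvStripSup ≠ [] := by
      simp only [ne_eq, List.map_eq_nil_iff, List.filter_eq_nil_iff]
      simp only [List.any_eq_true] at h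
      obtain ⟨x, hx, hpx⟩ := h
      exact fun hall => by simpa [hpx] using hall x hx
    rw [if_pos h]
    simp only [if_neg hne]
    simp [pvInsertEq rf h]
  · have he : rf.filter pvIsSup = [] := by
      simp only [List.any_eq_true] at h
      simp only [List.filter_eq_nil_iff]
      intro x hx; by_contra hc; exact h ⟨x, hx, by simpa using hc⟩
    have hfe : rf.filter (fun f => !pvIsSup f) = rf :=
      List.filter_eq_self.mpr (fun x hx => by
        have := List.filter_eq_nil_iff.mp he x hx; simpa using this)
    rw [if_neg (by simpa using h), he]
    simp [hfe]
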